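-- pv_equiv track=rewrite | github.com/LemonDrew/codeSDK | routes/safeguard.py | reverse_encode_index_parity
-- ===== SOURCE A (Python) =====
-- def reverse_encode_index_parity(text):
--     """Reverse: rearrange from even-first, odd-second back to original"""
--     words = text.split()
--     result = []
--     for word in words:
--         if len(word) <= 1:
--             result.append(word)
--             continue
--
--         mid = (len(word) + 1) // 2
--         even_chars = word[:mid]  # chars that were at even indices
--         odd_chars = word[mid:]   # chars that were at odd indices
--
--         # Reconstruct original order
--         original = [''] * len(word)
--         even_idx = 0
--         odd_idx = 0
--
--         for i in range(len(word)):
--             if i % 2 == 0:  # even index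
--                 original[i] = even_chars[even_idx]
--                 even_idx += 1
--             else:  # odd index
--                 original[i] = odd_chars[odd_idx]
--                 odd_idx += 1
--
--         result.append(''.join(original))
--     return ' '.join(result)
-- ===== SOURCE B (Python) =====
-- def reverse_encode_index_parity(text):
--     """Reverse: rearrange from even-first, odd-second back to original (zip interleave)"""
--     out = []
--     for word in text.split():
--         if len(word) <= 1:
--             out.append(word)
--             continue
--         mid = (len(word) + 1) // 2
--         even, odd = word[:mid], word[mid:]
--         chars = [c for pair in zip(even, odd) for c in pair]
--         if len(odd) < len(even):
--             chars.append(even[-1])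
--         out.append(''.join(chars))
--     return ' '.join(out)
-- ===== Notes on version B (the rewrite author's own statement) =====
-- stated objective: idiomatic
-- what changed: Replaces A's preallocated result array, index-parity loop and two manual cursors with a pairwise zip interleave of the two halves (plus the trailing even char for odd-length words).
import Mathlib
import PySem

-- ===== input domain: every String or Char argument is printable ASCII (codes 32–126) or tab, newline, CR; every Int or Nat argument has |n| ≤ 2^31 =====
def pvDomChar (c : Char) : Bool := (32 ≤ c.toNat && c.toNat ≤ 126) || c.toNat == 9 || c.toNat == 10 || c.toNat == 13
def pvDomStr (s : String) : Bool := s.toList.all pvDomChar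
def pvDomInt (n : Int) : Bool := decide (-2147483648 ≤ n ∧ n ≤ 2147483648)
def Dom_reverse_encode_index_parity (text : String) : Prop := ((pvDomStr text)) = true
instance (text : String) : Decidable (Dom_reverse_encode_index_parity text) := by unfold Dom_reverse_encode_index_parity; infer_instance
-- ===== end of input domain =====

-- B replaces A's preallocated array, index-parity loop and two cursors with a zip interleave of the two halves; same O(n) cost, plainer code.

-- ===== PORT A =====
-- the for-i loop: original[i] = even_chars[even_idx] / odd_chars[odd_idx]; the .getD ' '
-- defaults are never hit (Python would raise IndexError; the cursors always stay in range here)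
def pvFillA (even odd : List Char) : List Nat → List (List Char) → Nat → Nat → List (List Char)
  | [], orig, _, _ => orig
  | i :: rest, orig, ei, oi =>
    if i % 2 == 0 then
      pvFillA even odd rest (orig.set i [(PySem.List.pyGet? even (ei : Int)).getD ' ']) (ei + 1) oi
    else
      pvFillA even odd rest (orig.set i [(PySem.List.pyGet? odd (oi : Int)).getD ' ']) ei (oi + 1)

-- per-word body of A's loop
def pvWordA (w : String) : String :=
  if PySem.Str.len w ≤ 1 then w
  else
    let cs := w.toList
    let n := cs.length
    let mid := (n + 1) / 2
    let even := PySem.List.slice cs none (some (mid : Int))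
    let odd := PySem.List.slice cs (some (mid : Int)) none
    String.mk (PySem.Chars.join [] (pvFillA even odd (List.range n) (List.replicate n []) 0 0))

def reverse_encode_index_parity (text : String) : String :=
  let words := PySem.Str.split₀ text
  let result := words.map pvWordA
  PySem.Str.join " " result

-- ===== PORT B =====
-- per-word body of B's loop: interleave the two halves by zip, append the last even char if longer
def pvWordB (w : String) : String :=
  if PySem.Str.len w ≤ 1 then w
  else
    let cs := w.toList
    let mid := (cs.length + 1) / 2
    let even := PySem.List.slice cs none (some (mid : Int))
    let odd := PySem.List.slice cs (some (mid : Int)) none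
    let chars := (even.zip odd).flatMap (fun p => [p.1, p.2])
    String.mk (chars ++ (if odd.length < even.length then [(PySem.List.pyGet? even (-1)).getD ' '] else []))

def reverse_encode_index_parity_alt (text : String) : String :=
  PySem.Str.join " " ((PySem.Str.split₀ text).map pvWordB)

-- ===== PRECONDITION & SPEC =====
def Spec_reverse_encode_index_parity (text : String) (out : String) : Prop := out = reverse_encode_index_parity_alt text
instance (text : String) (out : String) : Decidable (Spec_reverse_encode_index_parity text out) := by unfold Spec_reverse_encode_index_parity; infer_instance

-- ===== CLAIM (what is proved, stated in full; the proofs are below) =====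
def Claim_equal_reverse_encode_index_parity : Prop := ∀ (text : String), Dom_reverse_encode_index_parity text → Spec_reverse_encode_index_parity text (reverse_encode_index_parity text)

-- ===== LEMMAS AND PROOFS =====

-- the mathematical interleaving both loops compute
def pvIlv : List Char → List Char → List Char
  | [], ys => ys
  | x :: xs, ys => x :: pvIlv ys xs
termination_by xs ys => xs.length + ys.length
decreasing_by simp; omega

theorem pvIlv_nil (ys : List Char) : pvIlv [] ys = ys := by simp [pvIlv]

theorem pvIlv_cons (x : Char) (xs ys : List Char) : pvIlv (x :: xs) ys = x :: pvIlv ys xs := by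
  simp [pvIlv]

-- invariant of A's fill loop
theorem pvFillA_spec (e o : List Char) :
    ∀ (m i ei oi : Nat) (pre : List (List Char)),
    pre.length = i → ei ≤ e.length → oi ≤ o.length →
    (i % 2 = 0 → e.length - ei = (m + 1) / 2 ∧ o.length - oi = m / 2) →
    (i % 2 = 1 → o.length - oi = (m + 1) / 2 ∧ e.length - ei = m / 2) →
    pvFillA e o (List.range' i m) (pre ++ List.replicate m []) ei oi =
      pre ++ (if i % 2 = 0 then pvIlv (e.drop ei) (o.drop oi) else pvIlv (o.drop oi) (e.drop ei)).map (fun c => [c]) := by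
  intro m
  induction m with
  | zero =>
    intro i ei oi pre hpre hei hoi hev hod
    rcases Nat.mod_two_eq_zero_or_one i with h | h
    · obtain ⟨h1, h2⟩ := hev h
      have hde : e.drop ei = [] := List.drop_eq_nil_of_le (by omega)
      have hdo : o.drop oi = [] := List.drop_eq_nil_of_le (by omega)
      simp [pvFillA, h, hde, hdo, pvIlv_nil]
    · obtain ⟨h1, h2⟩ := hod h
      have hde : e.drop ei = [] := List.drop_eq_nil_of_le (by omega)
      have hdo : o.drop oi = [] := List.drop_eq_nil_of_le (by omega)
      simp [pvFillA, h, hde, hdo, pvIlv_nil]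
  | succ k ih =>
    intro i ei oi pre hpre hei hoi hev hod
    rw [List.range'_succ, List.replicate_succ]
    have hset : ∀ (c : Char) (rest : List (List Char)),
        (pre ++ [] :: rest).set i [c] = (pre ++ [[c]]) ++ rest := by
      intro c rest
      rw [List.set_append_right _ _ (by omega)]
      simp [hpre]
    rcases Nat.mod_two_eq_zero_or_one i with h | h
    · -- even step: take e[ei]
      obtain ⟨h1, h2⟩ := hev h
      have heil : ei < e.length := by omega
      have hdropE : e.drop ei = e[ei] :: e.drop (ei + 1) := List.drop_eq_getElem_cons heil
      simp only [pvFillA]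
      rw [if_pos (show (i % 2 == 0) = true by simp [h])]
      rw [PySem.List.pyGet?_natCast, List.getElem?_eq_getElem heil]
      simp only [Option.getD_some]
      rw [hset]
      rw [ih (i + 1) (ei + 1) oi (pre ++ [[e[ei]]]) (by simp [hpre]) (by omega) hoi
        (by intro hc; omega) (by intro _; constructor <;> omega)]
      rw [if_neg (show ¬ (i + 1) % 2 = 0 by omega), if_pos h, hdropE, pvIlv_cons]
      simp
    · -- odd step: take o[oi]
      obtain ⟨h1, h2⟩ := hod h
      have hoil : oi < o.length := by omega
      have hdropO : o.drop oi = o[oi] :: o.drop (oi + 1) := List.drop_eq_getElem_cons hoil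
      simp only [pvFillA]
      rw [if_neg (show ¬ (i % 2 == 0) = true by simp [h])]
      rw [PySem.List.pyGet?_natCast, List.getElem?_eq_getElem hoil]
      simp only [Option.getD_some]
      rw [hset]
      rw [ih (i + 1) ei (oi + 1) (pre ++ [[o[oi]]]) (by simp [hpre]) hei (by omega)
        (by intro _; constructor <;> omega) (by intro hc; omega)]
      rw [if_pos (show (i + 1) % 2 = 0 by omega), if_neg (show ¬ i % 2 = 0 by omega),
        hdropO, pvIlv_cons]
      simp

-- B's zip interleave equals pvIlv when the halves' lengths differ by at most one
theorem pvZip_spec : ∀ (o e : List Char), o.length ≤ e.length → e.length ≤ o.length + 1 →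
    (e.zip o).flatMap (fun p => [p.1, p.2]) ++
      (if o.length < e.length then [(PySem.List.pyGet? e (-1)).getD ' '] else []) = pvIlv e o := by
  intro o
  induction o with
  | nil =>
    intro e h1 h2
    match e with
    | [] => simp [pvIlv_nil]
    | [a] => simp [pvIlv_cons, pvIlv_nil, PySem.List.pyGet?_neg_one]
    | a :: b :: tl => simp at h2
  | cons b o' ih =>
    intro e h1 h2
    match e with
    | [] => simp at h1
    | a :: e' =>
      simp only [List.zip_cons_cons, List.flatMap_cons, pvIlv_cons]
      by_cases hc : o'.length < e'.length
      · have he' : e' ≠ [] := by intro hn; rw [hn] at hc; simp at hc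
        obtain ⟨c, tl, rfl⟩ : ∃ c tl, e' = c :: tl := by
          cases e' with | nil => exact absurd rfl he' | cons c tl => exact ⟨c, tl, rfl⟩
        have ihh := ih (c :: tl) (by simp at h1 ⊢; omega) (by simp at h2 ⊢; omega)
        rw [if_pos hc] at ihh
        rw [if_pos (show (b :: o').length < (a :: c :: tl).length by simp at hc ⊢; omega)]
        rw [PySem.List.pyGet?_neg_one, List.getLast?_cons_cons, ← PySem.List.pyGet?_neg_one]
        simp only [List.cons_append, List.nil_append] at ihh ⊢
        rw [ihh]
      · have ihh := ih e' (by simp at h1 ⊢; omega) (by simp at h2 ⊢; omega)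
        rw [if_neg hc] at ihh
        rw [if_neg (show ¬ (b :: o').length < (a :: e').length by simp at hc ⊢; omega)]
        simp only [List.append_nil] at ihh
        simp [ihh]

theorem pvJoin_singletons (cs : List Char) :
    PySem.Chars.join [] (cs.map (fun c => [c])) = cs := PySem.Chars.join_nil_singletons cs

-- per-word core equality (guard already taken): A's fill loop = B's zip interleave
theorem pvCore_eq (cs : List Char) (h2 : 2 ≤ cs.length) :
    PySem.Chars.join []
      (pvFillA (PySem.List.slice cs none (some (((cs.length + 1) / 2 : Nat) : Int)))
        (PySem.List.slice cs (some (((cs.length + 1) / 2 : Nat) : Int)) none)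
        (List.range cs.length) (List.replicate cs.length []) 0 0) =
    ((PySem.List.slice cs none (some (((cs.length + 1) / 2 : Nat) : Int))).zip
        (PySem.List.slice cs (some (((cs.length + 1) / 2 : Nat) : Int)) none)).flatMap
        (fun p => [p.1, p.2]) ++
      (if (PySem.List.slice cs (some (((cs.length + 1) / 2 : Nat) : Int)) none).length <
          (PySem.List.slice cs none (some (((cs.length + 1) / 2 : Nat) : Int))).length then
        [(PySem.List.pyGet? (PySem.List.slice cs none (some (((cs.length + 1) / 2 : Nat) : Int))) (-1)).getD ' ']
      else []) := by
  rw [PySem.List.slice_to_natCast, PySem.List.slice_from_natCast]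
  have hA := pvFillA_spec (cs.take ((cs.length + 1) / 2)) (cs.drop ((cs.length + 1) / 2))
    cs.length 0 0 0 [] rfl (by omega) (by omega)
    (by intro _; simp only [List.length_take, List.length_drop]; constructor <;> omega)
    (by intro hc; omega)
  simp only [List.nil_append, List.drop_zero] at hA
  rw [if_true] at hA
  rw [List.range_eq_range', hA, pvJoin_singletons]
  exact (pvZip_spec (cs.drop ((cs.length + 1) / 2)) (cs.take ((cs.length + 1) / 2))
    (by simp only [List.length_take, List.length_drop]; omega)
    (by simp only [List.length_take, List.length_drop]; omega)).symm

theorem pvWord_eq (w : String) : pvWordA w = pvWordB w := by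
  unfold pvWordA pvWordB
  by_cases hg : PySem.Str.len w ≤ 1
  · rw [if_pos hg, if_pos hg]
  · rw [if_neg hg, if_neg hg]
    have h2 : 2 ≤ w.toList.length := by
      simp only [PySem.Str.len_eq] at hg; omega
    exact congrArg String.mk (pvCore_eq w.toList h2)

-- ===== VERDICT (by name: the statement is the Claim_ definition above) =====
theorem reverse_encode_index_parity_spec : Claim_equal_reverse_encode_index_parity := by
  intro text _
  unfold Spec_reverse_encode_index_parity reverse_encode_index_parity reverse_encode_index_parity_alt
  simp only [List.map_congr_left (fun w _ => pvWord_eq w)]
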